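-- pv_equiv track=rewrite | github.com/shivpandey02/CodePractice | vipul_codechef/MAKEDIV3.py | makeitdivisible
-- ===== SOURCE A (Python) =====
-- def makeitdivisible(number):
--     digit_number = 1
--     for i in range(number):
--         digit_number*=10
--     starting_number = digit_number//10
--
--     for i in range(starting_number,digit_number):
--         if i%2!=0 and i%3==0 and i%9!=0:
--             return i
-- ===== SOURCE B (Python) =====
-- def makeitdivisible(number):
--     # Closed-form: no scanning loop. None for number < 1, matching A's empty-range behaviour.
--     if number < 1:
--         return None
--     start = 10 ** (number - 1)
--     c = start + (-start) % 3      # smallest multiple of 3 >= start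
--     if c % 2 == 0:
--         c += 3                    # smallest odd multiple of 3 >= start
--     if c % 9 == 0:
--         c += 6                    # next odd multiple of 3 that is not a multiple of 9
--     return c
-- ===== Notes on version B (the rewrite author's own statement) =====
-- stated objective: faster
-- what changed: Replaces A's linear scan over the whole n-digit range (after building 10^n by a loop) with direct arithmetic: jump to the next multiple of 3 at or above 10^(n-1), then to the next odd one, skipping a multiple of 9 by adding 6.
import Mathlib
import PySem

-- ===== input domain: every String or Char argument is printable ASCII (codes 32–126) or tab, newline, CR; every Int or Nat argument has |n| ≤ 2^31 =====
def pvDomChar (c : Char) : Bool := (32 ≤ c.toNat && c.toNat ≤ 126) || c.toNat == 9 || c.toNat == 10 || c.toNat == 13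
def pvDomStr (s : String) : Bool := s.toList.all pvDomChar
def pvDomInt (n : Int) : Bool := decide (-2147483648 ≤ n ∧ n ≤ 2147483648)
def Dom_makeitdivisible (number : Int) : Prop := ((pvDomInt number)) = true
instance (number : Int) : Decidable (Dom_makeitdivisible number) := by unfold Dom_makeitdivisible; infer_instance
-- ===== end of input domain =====

-- B replaces A's linear scan of the n-digit range with closed-form arithmetic (faster: no scan).


-- ===== PORT A =====
-- 'for i in range(a, b): if cond(i): return i' ported as a counted loop (one fuel step per
-- range element, exactly (b - a).toNat iterations, early return on the first hit)
def pvACond (i : Int) : Bool :=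
  !(PySem.Int.mod i 2 == 0) && (PySem.Int.mod i 3 == 0) && !(PySem.Int.mod i 9 == 0)

def pvALoop (fuel : Nat) (i : Int) : Option Int :=
  match fuel with
  | 0 => none
  | f + 1 => if pvACond i then some i else pvALoop f (i + 1)

def makeitdivisible (number : Int) : Option Int :=
  let digit_number := (PySem.List.pyRange 0 number 1).foldl (fun d _ => d * 10) 1
  let starting_number := PySem.Int.floordiv digit_number 10
  pvALoop (digit_number - starting_number).toNat starting_number

-- ===== PORT B =====
def makeitdivisible_alt (number : Int) : Option Int :=
  if number < 1 then none
  else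
    -- exponent number - 1 ≥ 0 here, so .toNat is exact for Python's 10 ** (number - 1)
    let start : Int := 10 ^ (number - 1).toNat
    let c1 := start + PySem.Int.mod (-start) 3
    let c2 := if PySem.Int.mod c1 2 = 0 then c1 + 3 else c1
    let c3 := if PySem.Int.mod c2 9 = 0 then c2 + 6 else c2
    some c3

-- ===== PRECONDITION & SPEC =====
def Spec_makeitdivisible (number : Int) (out : Option Int) : Prop := out = makeitdivisible_alt number
instance (number : Int) (out : Option Int) : Decidable (Spec_makeitdivisible number out) := by unfold Spec_makeitdivisible; infer_instance

-- ===== CLAIM (what is proved, stated in full; the proofs are below) =====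
def Claim_equal_makeitdivisible : Prop := ∀ (number : Int), Dom_makeitdivisible number → Spec_makeitdivisible number (makeitdivisible number)

-- ===== LEMMAS AND PROOFS =====

-- the first loop of A computes 10^n
theorem pv_fold_pow (n : Nat) :
    (PySem.List.pyRange 0 (n : Int) 1).foldl (fun d _ => d * 10) (1 : Int) = (10 : Int) ^ n := by
  rw [PySem.List.pyRange_one]
  simp only [sub_zero, Int.toNat_natCast, List.foldl_map]
  induction n with
  | zero => simp
  | succ k ih => simp [List.range_succ, List.foldl_append, ih, pow_succ]

theorem pv_pow10_mod3 (k : Nat) : ((10:Int) ^ k) % 3 = 1 := by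
  induction k with
  | zero => decide
  | succ m ih => rw [pow_succ, Int.mul_emod, ih]; norm_num

theorem pv_pow10_mod9 (k : Nat) : ((10:Int) ^ k) % 9 = 1 := by
  induction k with
  | zero => decide
  | succ m ih => rw [pow_succ, Int.mul_emod, ih]; norm_num

theorem pv_pow10_mod2 (k : Nat) : ((10:Int) ^ (k + 1)) % 2 = 0 := by
  rw [pow_succ, Int.mul_emod]
  simp

theorem pv_ten_le_pow (k : Nat) : (10:Int) ≤ 10 ^ (k + 1) := by
  calc (10:Int) = 10 ^ 1 := by norm_num
    _ ≤ 10 ^ (k + 1) := pow_le_pow_right₀ (by norm_num) (by omega)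

-- stepping lemma: a failing element is skipped
theorem pv_loop_step (f : Nat) (i : Int) (h : pvACond i = false) :
    pvALoop (f + 1) i = pvALoop f (i + 1) := by
  simp [pvALoop, h]

-- A's scan starting at 10^(k+1) stops at 10^(k+1) + 5 (first odd multiple of 3 not divisible by 9)
theorem pv_findA (m : Nat) (k : Nat) :
    pvALoop (m + 6) ((10:Int) ^ (k+1)) = some ((10:Int) ^ (k+1) + 5) := by
  have ha : (10:Int) ≤ 10 ^ (k+1) := pv_ten_le_pow k
  have h2 : ((10:Int) ^ (k+1)) % 2 = 0 := pv_pow10_mod2 k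
  have h3 : ((10:Int) ^ (k+1)) % 3 = 1 := pv_pow10_mod3 (k+1)
  have h9 : ((10:Int) ^ (k+1)) % 9 = 1 := pv_pow10_mod9 (k+1)
  set a : Int := 10 ^ (k+1) with hadef
  have hm2 : ∀ x : Int, PySem.Int.mod x 2 = x % 2 := fun x =>
    PySem.Int.mod_eq_emod_of_pos (by norm_num)
  have hm3 : ∀ x : Int, PySem.Int.mod x 3 = x % 3 := fun x =>
    PySem.Int.mod_eq_emod_of_pos (by norm_num)
  have hm9 : ∀ x : Int, PySem.Int.mod x 9 = x % 9 := fun x =>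
    PySem.Int.mod_eq_emod_of_pos (by norm_num)
  have e0 : pvACond a = false := by simp [pvACond, h2]
  have e1 : pvACond (a + 1) = false := by
    have : (a + 1) % 3 = 2 := by omega
    simp [pvACond, this]
  have e2 : pvACond (a + 1 + 1) = false := by
    have : (a + 1 + 1) % 2 = 0 := by omega
    simp [pvACond, this]
  have e3 : pvACond (a + 1 + 1 + 1) = false := by
    have : (a + 1 + 1 + 1) % 3 = 1 := by omega
    simp [pvACond, this]
  have e4 : pvACond (a + 1 + 1 + 1 + 1) = false := by
    have : (a + 1 + 1 + 1 + 1) % 3 = 2 := by omega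
    simp [pvACond, this]
  have e5 : pvACond (a + 1 + 1 + 1 + 1 + 1) = true := by
    have x2 : (a + 1 + 1 + 1 + 1 + 1) % 2 = 1 := by omega
    have x3 : (a + 1 + 1 + 1 + 1 + 1) % 3 = 0 := by omega
    have x9 : (a + 1 + 1 + 1 + 1 + 1) % 9 = 6 := by omega
    simp [pvACond, x2, x3, x9]
  have h6 : m + 6 = (m + 5) + 1 := by omega
  rw [h6, pv_loop_step _ _ e0]
  rw [show m + 5 = (m + 4) + 1 from by omega, pv_loop_step _ _ e1]
  rw [show m + 4 = (m + 3) + 1 from by omega, pv_loop_step _ _ e2]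
  rw [show m + 3 = (m + 2) + 1 from by omega, pv_loop_step _ _ e3]
  rw [show m + 2 = (m + 1) + 1 from by omega, pv_loop_step _ _ e4]
  rw [show m + 1 = m + 1 from rfl]
  simp [pvALoop, e5]
  ring

theorem pv_A_val (k : Nat) :
    makeitdivisible ((k + 2 : Nat) : Int) = some ((10:Int) ^ (k+1) + 5) := by
  show pvALoop _ _ = _
  rw [pv_fold_pow (k+2)]
  have hdiv : PySem.Int.floordiv ((10:Int) ^ (k+2)) 10 = 10 ^ (k+1) := by
    rw [PySem.Int.floordiv_eq_ediv_of_pos (by norm_num), pow_succ,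
      Int.mul_ediv_cancel _ (by norm_num)]
  rw [hdiv]
  have ha : (10:Int) ≤ 10 ^ (k+1) := pv_ten_le_pow k
  have hpow : (10:Int) ^ (k+2) = 10 ^ (k+1) * 10 := by rw [pow_succ]
  have hfuel : ((10:Int) ^ (k+2) - 10 ^ (k+1)).toNat
      = (((10:Int) ^ (k+2) - 10 ^ (k+1)).toNat - 6) + 6 := by
    have : (6:Int) ≤ 10 ^ (k+2) - 10 ^ (k+1) := by nlinarith
    omega
  rw [hfuel]
  exact pv_findA _ k

theorem pv_B_val (k : Nat) :
    makeitdivisible_alt ((k + 2 : Nat) : Int) = some ((10:Int) ^ (k+1) + 5) := by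
  have hnot : ¬ (((k + 2 : Nat) : Int) < 1) := by push_cast; omega
  have htn : (((k + 2 : Nat) : Int) - 1).toNat = k + 1 := by omega
  have h2' : ((10:Int) ^ (k+1)) % 2 = 0 := pv_pow10_mod2 k
  have h3' : ((10:Int) ^ (k+1)) % 3 = 1 := pv_pow10_mod3 (k+1)
  have h9' : ((10:Int) ^ (k+1)) % 9 = 1 := pv_pow10_mod9 (k+1)
  simp only [makeitdivisible_alt, if_neg hnot, htn]
  have e3 : PySem.Int.mod (-(10:Int) ^ (k+1)) 3 = 2 := by
    rw [PySem.Int.mod_eq_emod_of_pos (by norm_num)]; omega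
  rw [e3]
  have e2 : PySem.Int.mod ((10:Int) ^ (k+1) + 2) 2 = 0 := by
    rw [PySem.Int.mod_eq_emod_of_pos (by norm_num)]; omega
  rw [if_pos e2]
  have e9 : PySem.Int.mod ((10:Int) ^ (k+1) + 2 + 3) 9 = 6 := by
    rw [PySem.Int.mod_eq_emod_of_pos (by norm_num)]; omega
  rw [if_neg (by rw [e9]; norm_num)]
  norm_num
  ring

-- ===== VERDICT (by name: the statement is the Claim_ definition above) =====
theorem makeitdivisible_spec : Claim_equal_makeitdivisible := by
  intro number _
  unfold Spec_makeitdivisible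
  rcases lt_or_ge number 1 with hlt | hge
  · -- number ≤ 0: A's outer range is empty, inner scan is range(0,1) and matches nothing
    have h0 : (number - 0).toNat = 0 := by omega
    simp only [makeitdivisible, makeitdivisible_alt, if_pos hlt,
      PySem.List.pyRange_one 0 number, h0]
    decide
  · rcases eq_or_lt_of_le hge with h1 | h2
    · -- number = 1
      rw [← h1]; decide
    · -- number ≥ 2
      obtain ⟨k, hk⟩ : ∃ k : Nat, number = ((k + 2 : Nat) : Int) := ⟨(number - 2).toNat, by omega⟩
      subst hk
      rw [pv_A_val k, pv_B_val k]
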